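-- pv_equiv track=rewrite | github.com/Matrix-aas/srclight-pro-max | src/srclight/community.py | _bfs_flows
-- ===== SOURCE A (Python) =====
-- def _bfs_flows(
--     start: int,
--     adjacency: dict[int, list[int]],
--     max_depth: int,
--     max_branching: int,
-- ) -> list[list[int]]:
--     """BFS from a single entry point. Returns list of paths."""
--     flows: list[list[int]] = []
--     stack = [([start], 0)]
--
--     while stack:
--         path, depth = stack.pop()
--         current = path[-1]
--
--         if depth >= max_depth:
--             flows.append(path)
--             continue
--
--         callees = adjacency.get(current, [])
--         if not callees:
--             if len(path) >= 2:
--                 flows.append(path)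
--             continue
--
--         extended = False
--         for callee in callees[:max_branching]:
--             if callee in path:
--                 continue  # avoid cycles
--             stack.append((path + [callee], depth + 1))
--             extended = True
--
--         if not extended and len(path) >= 2:
--             flows.append(path)
--
--     return flows
-- ===== SOURCE B (Python) =====
-- def _bfs_flows(
--     start: int,
--     adjacency: dict[int, list[int]],
--     max_depth: int,
--     max_branching: int,
-- ) -> list[list[int]]:
--     """Recursive DFS from a single entry point. Returns list of paths.
--
--     Children are visited in reverse order so the output order matches the
--     LIFO order of the original stack-based implementation.
--     """
--
--     def dfs(path: list[int], depth: int) -> list[list[int]]: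
--         if depth >= max_depth:
--             return [path]
--         callees = adjacency.get(path[-1], [])
--         if not callees:
--             return [path] if len(path) >= 2 else []
--         children = [c for c in callees[:max_branching] if c not in path]
--         if not children:
--             return [path] if len(path) >= 2 else []
--         flows: list[list[int]] = []
--         for callee in reversed(children):
--             flows += dfs(path + [callee], depth + 1)
--         return flows
--
--     return dfs([start], 0)
-- ===== Notes on version B (the rewrite author's own statement) =====
-- stated objective: alternative
-- what changed: Replaced A's explicit LIFO work-stack loop (pop entry, push extended paths, track an 'extended' flag) with a recursive DFS helper that returns each subtree's flows directly, visiting children in reverse order to reproduce the stack's LIFO output order.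
import Mathlib
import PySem

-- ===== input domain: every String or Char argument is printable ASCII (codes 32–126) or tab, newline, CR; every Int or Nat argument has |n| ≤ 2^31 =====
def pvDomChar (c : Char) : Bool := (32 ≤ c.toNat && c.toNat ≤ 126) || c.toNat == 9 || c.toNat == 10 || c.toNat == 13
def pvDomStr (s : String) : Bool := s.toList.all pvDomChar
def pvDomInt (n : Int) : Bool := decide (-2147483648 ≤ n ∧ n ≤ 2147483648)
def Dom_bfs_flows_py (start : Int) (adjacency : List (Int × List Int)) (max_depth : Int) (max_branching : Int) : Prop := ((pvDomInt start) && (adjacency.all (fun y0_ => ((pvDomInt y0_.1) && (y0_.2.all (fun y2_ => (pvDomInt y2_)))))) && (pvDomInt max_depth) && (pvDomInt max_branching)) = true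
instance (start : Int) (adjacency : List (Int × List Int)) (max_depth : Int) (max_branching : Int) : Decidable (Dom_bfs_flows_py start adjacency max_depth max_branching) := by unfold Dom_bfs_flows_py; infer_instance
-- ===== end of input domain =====

-- B replaces A's explicit LIFO work-stack loop with a recursive DFS that returns each subtree's
-- flows directly (children visited in reverse to preserve A's output order); objective: alternative.

-- ===== PORT A =====
-- dict.get(current, []) on the association list (first match, per the type convention)
def pvGet : List (Int × List Int) → Int → List Int
  | [], _ => []
  | (a, b) :: rest, k => if a = k then b else pvGet rest k

-- the body of A's inner `for callee in callees[:max_branching]` loop (state: stack × extended)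
def pvPush (path : List Int) (depth : Int) (p : List (List Int × Int) × Bool) (c : Int) :
    List (List Int × Int) × Bool :=
  if path.contains c then p else ((path ++ [c], depth + 1) :: p.1, true)

-- termination-measure helpers for A's while-loop (not part of the computation's values)
def pvMaxLen : List (Int × List Int) → Nat
  | [] => 0
  | (_, b) :: rest => Nat.max b.length (pvMaxLen rest)

def pvW (max_depth : Int) (C : Nat) (stack : List (List Int × Int)) : Nat :=
  (stack.map (fun e => C ^ ((max_depth - e.2).toNat))).sum

-- any value returned by pvGet is [] or one of the dict's values, so its length is ≤ pvMaxLen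
theorem pvGet_len_le (adjacency : List (Int × List Int)) (k : Int) :
    (pvGet adjacency k).length ≤ pvMaxLen adjacency := by
  induction adjacency with
  | nil => simp [pvGet, pvMaxLen]
  | cons hd tl ih =>
    obtain ⟨a, b⟩ := hd
    simp only [pvGet, pvMaxLen]
    split
    · exact Nat.le_max_left _ _
    · exact le_trans ih (Nat.le_max_right _ _)

-- the push-loop prepends the kept callees (in reverse) to the remaining stack
theorem pvFold_fst (path : List Int) (depth : Int) (l : List Int) :
    ∀ (st : List (List Int × Int)) (b : Bool),
      (l.foldl (pvPush path depth) (st, b)).1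
      = ((l.filter (fun c => !path.contains c)).reverse.map
          (fun c => (path ++ [c], depth + 1))) ++ st := by
  induction l with
  | nil => intro st b; simp
  | cons c t ih =>
    intro st b
    by_cases h : c ∈ path <;>
      simp [pvPush, List.foldl_cons, h, ih]

theorem pvW_push_lt (max_depth : Int) (C : Nat) (hC : 0 < C)
    (path : List Int) (depth : Int) (rest : List (List Int × Int))
    (l : List Int) (hl : l.length < C) (hd : depth < max_depth) :
    pvW max_depth C ((l.reverse.map (fun c => (path ++ [c], depth + 1))) ++ rest)
      < pvW max_depth C ((path, depth) :: rest) := by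
  have hk : (max_depth - depth).toNat = (max_depth - (depth + 1)).toNat + 1 := by omega
  set k := (max_depth - (depth + 1)).toNat with hkdef
  have hsum : ∀ (m : List Int),
      ((m.map (fun c => (path ++ [c], depth + 1))).map
        (fun e => C ^ ((max_depth - e.2).toNat))).sum = m.length * C ^ k := by
    intro m
    induction m with
    | nil => simp
    | cons x t ih => simp only [List.map_cons, List.sum_cons, List.length_cons, ih]; ring
  have hlt : l.length * C ^ k < C ^ ((max_depth - depth).toNat) := by
    rw [hk, pow_succ]
    have hp : 0 < C ^ k := Nat.pow_pos hC
    calc l.length * C ^ k < C * C ^ k := (Nat.mul_lt_mul_right hp).mpr hl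
    _ = C ^ k * C := Nat.mul_comm _ _
  have hrev : l.reverse.length = l.length := List.length_reverse
  simp only [pvW, List.map_append, List.sum_append, List.map_cons, List.sum_cons, hsum, hrev]
  omega

-- ===== PORT A, the loop (stack held top-first: Python's `stack.pop()` pops the end; here the head) =====
def pvLoop (adjacency : List (Int × List Int)) (max_depth max_branching : Int) :
    List (List Int × Int) → List (List Int) → List (List Int)
  | [], flows => flows
  | (path, depth) :: rest, flows =>
    if h : max_depth ≤ depth then
      pvLoop adjacency max_depth max_branching rest (flows ++ [path])
    else
      -- current = path[-1]; path is never empty here, so the .getD 0 default is never used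
      let callees := pvGet adjacency ((PySem.List.pyGet? path (-1)).getD 0)
      if callees = [] then
        pvLoop adjacency max_depth max_branching rest
          (if 2 ≤ path.length then flows ++ [path] else flows)
      else
        let pr := (PySem.List.slice callees none (some max_branching)).foldl
          (pvPush path depth) (rest, false)
        pvLoop adjacency max_depth max_branching pr.1
          (if pr.2 = false ∧ 2 ≤ path.length then flows ++ [path] else flows)
termination_by stack _ => pvW max_depth (pvMaxLen adjacency + 1) stack
decreasing_by
  · have : 0 < (pvMaxLen adjacency + 1) ^ ((max_depth - depth).toNat) :=
      Nat.pow_pos (by omega)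
    simp only [pvW, List.map_cons, List.sum_cons]; omega
  · have : 0 < (pvMaxLen adjacency + 1) ^ ((max_depth - depth).toNat) :=
      Nat.pow_pos (by omega)
    simp only [pvW, List.map_cons, List.sum_cons]; omega
  · rw [pvFold_fst]
    apply pvW_push_lt _ _ (by omega) _ _ _ _ _ (by omega)
    have h1 : ((PySem.List.slice (pvGet adjacency ((PySem.List.pyGet? path (-1)).getD 0))
          none (some max_branching)).filter (fun c => !path.contains c)).length
        ≤ (PySem.List.slice (pvGet adjacency ((PySem.List.pyGet? path (-1)).getD 0))
          none (some max_branching)).length :=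
      List.length_filter_le _ _
    have h2 : (PySem.List.slice (pvGet adjacency ((PySem.List.pyGet? path (-1)).getD 0))
          none (some max_branching)).length
        ≤ (pvGet adjacency ((PySem.List.pyGet? path (-1)).getD 0)).length := by
      simp [PySem.List.slice]
    have h3 : (pvGet adjacency ((PySem.List.pyGet? path (-1)).getD 0)).length
        ≤ pvMaxLen adjacency := pvGet_len_le _ _
    omega

def bfs_flows_py (start : Int) (adjacency : List (Int × List Int)) (max_depth : Int) (max_branching : Int) : List (List Int) :=
  pvLoop adjacency max_depth max_branching [([start], 0)] []

-- ===== PORT B =====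
def pvDfs (adjacency : List (Int × List Int)) (max_depth max_branching : Int)
    (path : List Int) (depth : Int) : List (List Int) :=
  if h : max_depth ≤ depth then [path]
  else
    -- path[-1]; path is never empty here, so the .getD 0 default is never used
    let callees := pvGet adjacency ((PySem.List.pyGet? path (-1)).getD 0)
    if callees = [] then (if 2 ≤ path.length then [path] else [])
    else
      let children := (PySem.List.slice callees none (some max_branching)).filter
        (fun c => !path.contains c)
      if children = [] then (if 2 ≤ path.length then [path] else [])
      else children.reverse.flatMap
        (fun c => pvDfs adjacency max_depth max_branching (path ++ [c]) (depth + 1))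
termination_by (max_depth - depth).toNat
decreasing_by omega

def bfs_flows_py_alt (start : Int) (adjacency : List (Int × List Int)) (max_depth : Int) (max_branching : Int) : List (List Int) :=
  pvDfs adjacency max_depth max_branching [start] 0

-- ===== PRECONDITION & SPEC =====
def Spec_bfs_flows_py (start : Int) (adjacency : List (Int × List Int)) (max_depth : Int) (max_branching : Int) (out : List (List Int)) : Prop := out = bfs_flows_py_alt start adjacency max_depth max_branching
instance (start : Int) (adjacency : List (Int × List Int)) (max_depth : Int) (max_branching : Int) (out : List (List Int)) : Decidable (Spec_bfs_flows_py start adjacency max_depth max_branching out) := by unfold Spec_bfs_flows_py; infer_instance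

-- ===== CLAIM (what is proved, stated in full; the proofs are below) =====
def Claim_equal_bfs_flows_py : Prop := ∀ (start : Int) (adjacency : List (Int × List Int)) (max_depth : Int) (max_branching : Int), Dom_bfs_flows_py start adjacency max_depth max_branching → Spec_bfs_flows_py start adjacency max_depth max_branching (bfs_flows_py start adjacency max_depth max_branching)

-- ===== LEMMAS AND PROOFS =====

-- the push-loop's `extended` flag is true iff some sliced callee is outside the path
theorem pvFold_snd (path : List Int) (depth : Int) (l : List Int) :
    ∀ (st : List (List Int × Int)) (b : Bool),
      (l.foldl (pvPush path depth) (st, b)).2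
      = (b || l.any (fun c => !path.contains c)) := by
  induction l with
  | nil => intro st b; simp
  | cons c t ih =>
    intro st b
    by_cases h : c ∈ path <;>
      simp [pvPush, List.foldl_cons, h, ih]


-- A's loop consumes the stack top-first, emitting exactly the DFS flows of each entry in order
theorem pvLoop_eq_dfs (adjacency : List (Int × List Int)) (max_depth max_branching : Int)
    (stack : List (List Int × Int)) (flows : List (List Int)) :
    pvLoop adjacency max_depth max_branching stack flows
      = flows ++ stack.flatMap (fun e => pvDfs adjacency max_depth max_branching e.1 e.2) := by
  fun_induction pvLoop adjacency max_depth max_branching stack flows with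
  | case1 flows => simp
  | case2 path depth rest flows h ih =>
    rw [ih]
    simp only [List.flatMap_cons]
    rw [pvDfs]
    simp [h]
  | case3 path depth rest flows h callees hc ih =>
    simp only [dite_eq_ite] at ih
    rw [ih]
    simp only [List.flatMap_cons]
    rw [pvDfs]
    simp only [dif_neg h]
    split <;> simp
  | case4 path depth rest flows h callees hc pr ih =>
    have hcE : pvGet adjacency ((PySem.List.pyGet? path (-1)).getD 0) ≠ [] := hc
    have hfst : pr.1 = ((PySem.List.slice (pvGet adjacency ((PySem.List.pyGet? path (-1)).getD 0))
        none (some max_branching)).filter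
        (fun c => !path.contains c)).reverse.map (fun c => (path ++ [c], depth + 1)) ++ rest := by
      simp only [pr, pvFold_fst]
      rfl
    have hsnd : pr.2 = (PySem.List.slice (pvGet adjacency ((PySem.List.pyGet? path (-1)).getD 0))
        none (some max_branching)).any (fun c => !path.contains c) := by
      simp only [pr, pvFold_snd, Bool.false_or]
      rfl
    simp only [List.flatMap_cons]
    rw [pvDfs]
    simp only [dif_neg h]
    rw [if_neg hcE]
    by_cases hany : (PySem.List.slice (pvGet adjacency ((PySem.List.pyGet? path (-1)).getD 0))
        none (some max_branching)).any (fun c => !path.contains c)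
    · -- extended: some callee was pushed
      have hch : ((PySem.List.slice (pvGet adjacency ((PySem.List.pyGet? path (-1)).getD 0))
          none (some max_branching)).filter (fun c => !path.contains c)) ≠ [] := by
        simp only [ne_eq, List.filter_eq_nil_iff]
        simp only [List.any_eq_true] at hany
        obtain ⟨c, hc1, hc2⟩ := hany
        intro hall
        exact absurd hc2 (by simpa using hall c hc1)
      have hp2 : pr.2 = true := by rw [hsnd]; exact hany
      have ih' : pvLoop adjacency max_depth max_branching pr.1 flows
          = flows ++ List.flatMap (fun e => pvDfs adjacency max_depth max_branching e.1 e.2) pr.1 := by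
        simpa [hp2] using ih
      have hgf : (if pr.2 = false ∧ 2 ≤ path.length then flows ++ [path] else flows) = flows := by
        rw [hp2]; simp
      rw [hgf, ih', if_neg hch, hfst]
      rw [List.flatMap_append, List.flatMap_map]
    · -- not extended: nothing pushed, stack unchanged
      have hch : ((PySem.List.slice (pvGet adjacency ((PySem.List.pyGet? path (-1)).getD 0))
          none (some max_branching)).filter (fun c => !path.contains c)) = [] := by
        rw [List.filter_eq_nil_iff]
        intro c hcmem
        by_contra hcc
        exact hany (List.any_eq_true.mpr ⟨c, hcmem, by simpa using hcc⟩)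
      have hp2 : pr.2 = false := by rw [hsnd]; simpa using hany
      have hst : pr.1 = rest := by rw [hfst, hch]; simp
      have ih' : pvLoop adjacency max_depth max_branching rest
          (if 2 ≤ path.length then flows ++ [path] else flows)
          = (if 2 ≤ path.length then flows ++ [path] else flows)
            ++ List.flatMap (fun e => pvDfs adjacency max_depth max_branching e.1 e.2) rest := by
        simpa [hp2, hst] using ih
      have hgf : (if pr.2 = false ∧ 2 ≤ path.length then flows ++ [path] else flows)
          = (if 2 ≤ path.length then flows ++ [path] else flows) := by
        rw [hp2]; simp
      rw [hgf, hst, ih', if_pos hch]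
      split <;> simp

-- ===== VERDICT (by name: the statement is the Claim_ definition above) =====
theorem bfs_flows_py_spec : Claim_equal_bfs_flows_py := by
  intro start adjacency max_depth max_branching _
  show bfs_flows_py _ _ _ _ = bfs_flows_py_alt _ _ _ _
  rw [bfs_flows_py, bfs_flows_py_alt, pvLoop_eq_dfs]
  simp
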